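-- pv_equiv track=rewrite | github.com/zj1123581321/youtube_download_api | src/services/tikhub_service.py | _find_best_subtitle_url
-- ===== SOURCE A (Python) =====
-- from typing import Any, Optional
--
-- def _find_best_subtitle_url(formats: list[dict[str, Any]]) -> Optional[str]:
--     """
--     Find the best subtitle URL from available formats.
--
--     Prefers json3 format for TikHub API compatibility.
--
--     Args:
--         formats: List of subtitle format dictionaries.
--
--     Returns:
--         Best subtitle URL or None.
--     """
--     if not formats:
--         return None
--
--     # Prefer json3 format (required by TikHub API)
--     for fmt in formats:
--         if fmt.get("ext") == "json3":
--             url = fmt.get("url")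
--             if url:
--                 return str(url)
--
--     # Fallback to first available
--     for fmt in formats:
--         url = fmt.get("url")
--         if url:
--             return str(url)
--
--     return None
-- ===== SOURCE B (Python) =====
-- from typing import Any, Optional
--
-- def _find_best_subtitle_url(formats: list[dict[str, Any]]) -> Optional[str]:
--     """Single pass: return the first json3 url immediately, remembering the
--     first truthy url as a fallback."""
--     fallback = None
--     for fmt in formats:
--         url = fmt.get("url")
--         if fmt.get("ext") == "json3" and url:
--             return str(url)
--         if fallback is None and url:
--             fallback = str(url)
--     return fallback
-- ===== Notes on version B (the rewrite author's own statement) =====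
-- stated objective: alternative
-- what changed: Replaced A's two sequential scans (json3 pass, then fallback pass) by one loop that returns a json3 url immediately and threads a first-fallback accumulator.
import Mathlib
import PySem

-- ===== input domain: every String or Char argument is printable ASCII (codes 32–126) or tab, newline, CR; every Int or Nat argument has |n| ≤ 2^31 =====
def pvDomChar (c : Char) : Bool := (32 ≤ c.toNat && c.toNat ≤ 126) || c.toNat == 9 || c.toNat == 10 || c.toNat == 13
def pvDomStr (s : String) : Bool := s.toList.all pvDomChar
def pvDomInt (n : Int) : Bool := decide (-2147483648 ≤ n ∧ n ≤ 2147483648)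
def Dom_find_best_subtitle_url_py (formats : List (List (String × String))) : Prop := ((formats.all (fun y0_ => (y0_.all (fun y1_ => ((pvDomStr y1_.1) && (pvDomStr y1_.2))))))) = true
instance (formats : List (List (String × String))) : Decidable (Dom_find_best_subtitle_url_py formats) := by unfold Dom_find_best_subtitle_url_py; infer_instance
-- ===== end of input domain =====

-- B replaces A's two sequential scans by one pass with a first-fallback accumulator (alternative decomposition, same cost).


-- 'url' truthiness: fmt.get("url") is truthy iff the key is present with a non-empty string
def fbTruthy : Option String → Bool
  | some u => u != ""
  | none => false

-- ===== PORT A =====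
-- first loop of A: return the url of the first format whose "ext" is "json3" and whose url is truthy
def fbLoop1 : List (List (String × String)) → Option String
  | [] => none
  | fmt :: rest =>
    if fmt.lookup "ext" == some "json3" then
      if fbTruthy (fmt.lookup "url") then fmt.lookup "url" else fbLoop1 rest
    else fbLoop1 rest

-- second loop of A: return the first truthy url
def fbLoop2 : List (List (String × String)) → Option String
  | [] => none
  | fmt :: rest =>
    if fbTruthy (fmt.lookup "url") then fmt.lookup "url" else fbLoop2 rest

def find_best_subtitle_url_py (formats : List (List (String × String))) : Option String :=
  if formats = [] then none
  else match fbLoop1 formats with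
    | some u => some u
    | none =>
      match fbLoop2 formats with
      | some u => some u
      | none => none

-- ===== PORT B =====
-- single pass threading the first truthy url as a fallback
def fbGo (fallback : Option String) : List (List (String × String)) → Option String
  | [] => fallback
  | fmt :: rest =>
    let url := fmt.lookup "url"
    if fmt.lookup "ext" == some "json3" && fbTruthy url then url
    else if fallback.isNone && fbTruthy url then fbGo url rest
    else fbGo fallback rest

def find_best_subtitle_url_py_alt (formats : List (List (String × String))) : Option String :=
  fbGo none formats

-- ===== PRECONDITION & SPEC =====
def Spec_find_best_subtitle_url_py (formats : List (List (String × String))) (out : Option String) : Prop := out = find_best_subtitle_url_py_alt formats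
instance (formats : List (List (String × String))) (out : Option String) : Decidable (Spec_find_best_subtitle_url_py formats out) := by unfold Spec_find_best_subtitle_url_py; infer_instance

-- ===== CLAIM (what is proved, stated in full; the proofs are below) =====
def Claim_equal_find_best_subtitle_url_py : Prop := ∀ (formats : List (List (String × String))), Dom_find_best_subtitle_url_py formats → Spec_find_best_subtitle_url_py formats (find_best_subtitle_url_py formats)

-- ===== LEMMAS AND PROOFS =====
-- the accumulator loop equals: json3 result, else the fallback, else the first truthy url
theorem fbGo_spec (l : List (List (String × String))) (fb : Option String) :
    fbGo fb l = (fbLoop1 l).or (fb.or (fbLoop2 l)) := by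
  induction l generalizing fb with
  | nil => simp [fbGo, fbLoop1, fbLoop2]
  | cons fmt rest ih =>
    simp only [fbGo, fbLoop1, fbLoop2]
    cases hu : fmt.lookup "url" with
    | none =>
      by_cases hext : (fmt.lookup "ext" == some "json3") = true <;> cases fb <;>
        simp [hext, fbTruthy, ih, Option.or]
    | some u =>
      by_cases hext : (fmt.lookup "ext" == some "json3") = true <;>
      by_cases hu2 : u = "" <;> cases fb <;>
        simp [hext, hu2, fbTruthy, ih, Option.or]

-- ===== VERDICT (by name: the statement is the Claim_ definition above) =====
theorem find_best_subtitle_url_py_spec : Claim_equal_find_best_subtitle_url_py := by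
  intro formats _
  unfold Spec_find_best_subtitle_url_py find_best_subtitle_url_py find_best_subtitle_url_py_alt
  rw [fbGo_spec]
  cases h1 : fbLoop1 formats <;> cases h2 : fbLoop2 formats <;>
    cases formats <;> simp_all [fbLoop1, fbLoop2, Option.or]
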